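-- pv_equiv track=rewrite | github.com/Maximalfr/FMDS | app/utils/keywords.py | split_keywords_generator
-- ===== SOURCE A (Python) =====
-- from typing import Generator, Iterator, List
--
-- def split_keywords_generator(keywords_string: str) -> Generator[str, str, None]:
--     """
--     Create a generator that splits a string given multiple separators and yield only unique value.
--     :param keywords_string: The keywords to split
--     :return: A generator that yield each keyword
--     """
--     size = len(keywords_string)
--     last = 0
--     separators = {" ", ","}
--     seen = set()
--     for i in range(0, size):
--         if keywords_string[i] in separators:
--             if i - last > 1:  # Avoid the case of separators that follow each other
--                 word = keywords_string[last:i]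
--                 if word not in seen:  # Don't yield a keyword already yielded
--                     seen.add(word)
--                     yield word
--             last = min(i + 1, size)  # Avoid an OOB
--         elif i + 1 == size:  # Return the last word if not a separator
--             yield keywords_string[last:size]
-- ===== SOURCE B (Python) =====
-- def split_keywords_generator(keywords_string):
--     """Yield each keyword (length > 1) exactly once, splitting on spaces and commas."""
--     seen = set()
--     for word in keywords_string.replace(",", " ").split(" "):
--         if len(word) > 1 and word not in seen:
--             seen.add(word)
--             yield word
-- ===== Notes on version B (the rewrite author's own statement) =====
-- stated objective: faster
-- what changed: A scans characters one by one in Python-level loop with index/last bookkeeping and slicing; B splits the string into a token list with the C-implemented str.replace/str.split and makes one uniform filtering pass, yielding each token of length > 1 once.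
-- intended difference: On strings whose trailing token (after the last space/comma) is nonempty and either has length 1 or repeats an earlier token, A yields that trailing token anyway (skipping its own length and uniqueness filters, e.g. ['ab','ab'] for 'ab ab') while B filters it like every other token (['ab']); B's value is intended since the docstring promises unique keywords and A applies the length filter everywhere else. — e.g. on split_keywords_generator("ab ab"): A returns ["ab", "ab"], B returns ["ab"]
import Mathlib
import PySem

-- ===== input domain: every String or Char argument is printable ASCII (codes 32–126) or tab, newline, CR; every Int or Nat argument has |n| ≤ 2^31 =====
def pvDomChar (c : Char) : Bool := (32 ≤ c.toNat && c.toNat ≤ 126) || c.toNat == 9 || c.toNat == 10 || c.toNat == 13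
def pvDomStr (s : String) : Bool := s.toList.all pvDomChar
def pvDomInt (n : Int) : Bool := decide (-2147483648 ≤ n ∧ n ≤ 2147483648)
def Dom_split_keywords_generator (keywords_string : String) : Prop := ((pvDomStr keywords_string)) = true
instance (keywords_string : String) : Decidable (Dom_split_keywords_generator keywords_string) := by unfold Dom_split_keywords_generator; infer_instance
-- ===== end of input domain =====

-- B replaces A's per-character index bookkeeping by split-then-filter: split on space/comma and
-- yield each token of length > 1 once (measured faster, constant factor); on the trailing token A skips both filters — see D_.

-- ===== PORT A =====
def split_keywords_generator (keywords_string : String) : List String :=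
  let cs := keywords_string.toList
  let size : Int := PySem.List.len cs
  ((PySem.List.pyRange 0 size 1).foldl
    (fun (st : Int × PySem.Set (List Char) × List String) i =>
      if PySem.Set.contains (PySem.Set.ofList [' ', ',']) (PySem.List.pyGetD cs i ' ') then
        let st2 :=
          if i - st.1 > 1 then
            let word := PySem.List.slice cs (some st.1) (some i)
            if PySem.Set.contains st.2.1 word then st
            else (st.1, PySem.Set.add st.2.1 word, st.2.2 ++ [String.ofList word])
          else st
        (min (i + 1) size, st2.2.1, st2.2.2)
      else if i + 1 = size then
        (st.1, st.2.1, st.2.2 ++ [String.ofList (PySem.List.slice cs (some st.1) (some size))])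
      else st)
    (0, PySem.Set.empty, [])).2.2

-- ===== PORT B =====
def split_keywords_generator_alt (keywords_string : String) : List String :=
  ((PySem.Chars.splitOn (PySem.Chars.replace keywords_string.toList [','] [' ']) [' ']).foldl
    (fun (st : PySem.Set (List Char) × List String) word =>
      if 1 < word.length ∧ ¬ PySem.Set.contains st.1 word = true then
        (PySem.Set.add st.1 word, st.2 ++ [String.ofList word])
      else st)
    (PySem.Set.empty, [])).2

-- ===== PRECONDITION & SPEC =====

-- On strings whose trailing token (after the last space/comma) is nonempty and has length 1 or
-- repeats an earlier token, A yields that trailing token anyway (skipping its own length and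
-- uniqueness filters) while B filters it like every other token; B's value is the intended one —
-- the docstring promises unique keywords and A filters length 1 everywhere else.
-- (dGo is a tail-recursive scan: `seen` holds the earlier tokens and `cur` the current token, both reversed.)
def dGo : List Char → List (List Char) → List Char → Bool
  | [], seen, cur => !cur.isEmpty && (cur.length == 1 || seen.contains cur)
  | c :: r, seen, cur => if c == ' ' || c == ',' then dGo r (cur :: seen) [] else dGo r seen (c :: cur)

def D_split_keywords_generator (keywords_string : String) : Prop :=
  dGo keywords_string.toList [] [] = true
instance (keywords_string : String) : Decidable (D_split_keywords_generator keywords_string) := by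
  unfold D_split_keywords_generator; infer_instance

def Spec_split_keywords_generator (keywords_string : String) (out : List String) : Prop :=
  ¬ D_split_keywords_generator keywords_string → out = split_keywords_generator_alt keywords_string
instance (keywords_string : String) (out : List String) : Decidable (Spec_split_keywords_generator keywords_string out) := by
  unfold Spec_split_keywords_generator; infer_instance

def pvDiffWitness_split_keywords_generator : String := "ab ab"
def pvDiffWitnessOut_split_keywords_generator : (List String) × (List String) := (["ab", "ab"], ["ab"])

-- ===== CLAIM (what is proved, stated in full; the proofs are below) =====
def Claim_unchanged_split_keywords_generator : Prop := ∀ (keywords_string : String), Dom_split_keywords_generator keywords_string → Spec_split_keywords_generator keywords_string (split_keywords_generator keywords_string)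
def Claim_changed_split_keywords_generator : Prop := Dom_split_keywords_generator (pvDiffWitness_split_keywords_generator) ∧ D_split_keywords_generator (pvDiffWitness_split_keywords_generator) ∧ split_keywords_generator (pvDiffWitness_split_keywords_generator) = pvDiffWitnessOut_split_keywords_generator.1 ∧ split_keywords_generator_alt (pvDiffWitness_split_keywords_generator) = pvDiffWitnessOut_split_keywords_generator.2 ∧ pvDiffWitnessOut_split_keywords_generator.1 ≠ pvDiffWitnessOut_split_keywords_generator.2
def Claim_exact_split_keywords_generator : Prop := ∀ (keywords_string : String), Dom_split_keywords_generator keywords_string → D_split_keywords_generator keywords_string → split_keywords_generator keywords_string ≠ split_keywords_generator_alt keywords_string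

-- ===== LEMMAS AND PROOFS =====

-- the token list "s.replace(',',' ').split(' ')" computed structurally (used throughout the proofs)
def mySegs : List Char → List (List Char)
  | [] => [[]]
  | c :: rest => if c = ' ' ∨ c = ',' then [] :: mySegs rest else (mySegs rest).modifyHead (c :: ·)

-- the segment-level reading of D_: the trailing token is nonempty and length 1 or a duplicate
def Dseg (s : String) : Prop :=
  (mySegs s.toList).getLastD [] ≠ [] ∧
    (((mySegs s.toList).getLastD []).length = 1 ∨
      (mySegs s.toList).getLastD [] ∈ (mySegs s.toList).dropLast)

-- recursive characterisation of A's yielded keywords: walk the characters with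
-- the current (separator-free) partial word as accumulator
def goKW : List Char → List Char → PySem.Set (List Char) → List String → List String
  | [], cur, _, out => if cur = [] then out else out ++ [String.ofList cur]
  | c :: rest, cur, seen, out =>
    if c = ' ' ∨ c = ',' then
      if 1 < cur.length ∧ ¬ PySem.Set.contains seen cur = true then
        goKW rest [] (PySem.Set.add seen cur) (out ++ [String.ofList cur])
      else goKW rest [] seen out
    else goKW rest (cur ++ [c]) seen out

-- A's loop body (definitionally the lambda in port A)
def stepA (cs : List Char) : (Int × PySem.Set (List Char) × List String) → Int → (Int × PySem.Set (List Char) × List String) :=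
  fun st i =>
    if PySem.Set.contains (PySem.Set.ofList [' ', ',']) (PySem.List.pyGetD cs i ' ') then
      let st2 :=
        if i - st.1 > 1 then
          let word := PySem.List.slice cs (some st.1) (some i)
          if PySem.Set.contains st.2.1 word then st
          else (st.1, PySem.Set.add st.2.1 word, st.2.2 ++ [String.ofList word])
        else st
      (min (i + 1) (PySem.List.len cs), st2.2.1, st2.2.2)
    else if i + 1 = PySem.List.len cs then
      (st.1, st.2.1, st.2.2 ++ [String.ofList (PySem.List.slice cs (some st.1) (some (PySem.List.len cs)))])
    else st

-- B's loop body (definitionally the lambda in port B)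
def bstep : (PySem.Set (List Char) × List String) → List Char → (PySem.Set (List Char) × List String) :=
  fun st seg =>
    if 1 < seg.length ∧ ¬ PySem.Set.contains st.1 seg = true then
      (PySem.Set.add st.1 seg, st.2 ++ [String.ofList seg])
    else st

theorem mySegs_ne_nil (l : List Char) : mySegs l ≠ [] := by
  cases l with
  | nil => simp [mySegs]
  | cons c rest =>
    have := mySegs_ne_nil rest
    simp only [mySegs]
    split
    · simp
    · cases h : mySegs rest <;> simp_all [List.modifyHead]

theorem modifyHead_id' {α : Type} (l : List α) : List.modifyHead (fun x => x) l = l := by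
  cases l <;> simp [List.modifyHead]

theorem sep_contains (c : Char) :
    (PySem.Set.contains (PySem.Set.ofList [' ', ',']) c = true) ↔ (c = ' ' ∨ c = ',') := by
  simp [PySem.Set.contains, PySem.Set.ofList, PySem.Set.add, PySem.Set.empty]

theorem prefix_comma (c : Char) (t : List Char) :
    List.isPrefixOf [','] (c :: t) = (c == ',') := by
  simp [List.isPrefixOf, eq_comm]

theorem replace_go (l : List Char) : ∀ (fuel : Nat) (acc : List Char), l.length ≤ fuel →
    PySem.Chars.replace.go [','] [' '] fuel l acc
      = acc.reverse ++ l.map (fun c => if c = ',' then ' ' else c) := by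
  induction l with
  | nil => intro fuel acc _; cases fuel <;> simp [PySem.Chars.replace.go]
  | cons c t ih =>
    intro fuel acc hf
    cases fuel with
    | zero => simp at hf
    | succ f =>
      rw [PySem.Chars.replace.go]
      rw [prefix_comma]
      by_cases hc : c = ','
      · simp [hc, ih f _ (by simpa using hf)]
      · simp [hc, ih f _ (by simpa using hf)]

theorem replace_eq_map (l : List Char) :
    PySem.Chars.replace l [','] [' '] = l.map (fun c => if c = ',' then ' ' else c) := by
  rw [PySem.Chars.replace]
  simp [replace_go l l.length [] (le_refl _)]

theorem prefix_space (c : Char) (t : List Char) :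
    List.isPrefixOf [' '] (c :: t) = (c == ' ') := by
  simp [List.isPrefixOf, eq_comm]

theorem split_go (l : List Char) : ∀ (fuel : Nat) (cur : List Char) (acc : List (List Char)),
    l.length + 1 ≤ fuel →
    PySem.Chars.splitOn.go [' '] fuel (l.map (fun c => if c = ',' then ' ' else c)) cur acc
      = acc.reverse ++ (mySegs l).modifyHead (cur.reverse ++ ·) := by
  induction l with
  | nil =>
    intro fuel cur acc hf
    match fuel, hf with
    | f + 1, _ => simp [PySem.Chars.splitOn.go, mySegs]
  | cons c t ih =>
    intro fuel cur acc hf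
    match fuel, hf with
    | f + 1, hf =>
      rw [List.map_cons, PySem.Chars.splitOn.go, prefix_space]
      by_cases hc : c = ' ' ∨ c = ','
      · have hrep : (if c = ',' then ' ' else c) = ' ' := by
          rcases hc with h | h <;> simp [h]
        rw [hrep]
        simp only [BEq.rfl, if_true, List.length_cons, List.length_nil, List.drop_succ_cons,
          List.drop_zero]
        rw [ih f [] (cur.reverse :: acc) (by simpa using hf)]
        cases h : mySegs t with
        | nil => exact absurd h (mySegs_ne_nil t)
        | cons s ss => simp [mySegs, hc, h, List.modifyHead]
      · have hc' : ¬ c = ',' := fun h => hc (Or.inr h)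
        have hc'' : ¬ c = ' ' := fun h => hc (Or.inl h)
        have hrep : (if c = ',' then ' ' else c) = c := by simp [hc']
        rw [hrep]
        simp only [beq_iff_eq, hc'', if_false]
        rw [ih f (c :: cur) acc (by simpa using hf)]
        cases h : mySegs t with
        | nil => exact absurd h (mySegs_ne_nil t)
        | cons s ss => simp [mySegs, hc, h, List.modifyHead]

theorem splitOn_eq_mySegs (l : List Char) :
    PySem.Chars.splitOn (l.map (fun c => if c = ',' then ' ' else c)) [' '] = mySegs l := by
  rw [PySem.Chars.splitOn]
  rw [split_go l _ [] [] (by simp)]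
  cases h : mySegs l with
  | nil => exact absurd h (mySegs_ne_nil l)
  | cons s ss => simp [List.modifyHead]

theorem dGo_iff (l : List Char) : ∀ (seen : List (List Char)) (cur : List Char),
    (dGo l seen cur = true) ↔
      (((mySegs l).modifyHead (cur.reverse ++ ·)).getLastD [] ≠ [] ∧
        ((((mySegs l).modifyHead (cur.reverse ++ ·)).getLastD []).length = 1 ∨
          (∃ t ∈ seen, t.reverse = ((mySegs l).modifyHead (cur.reverse ++ ·)).getLastD []) ∨
          ((mySegs l).modifyHead (cur.reverse ++ ·)).getLastD [] ∈ ((mySegs l).modifyHead (cur.reverse ++ ·)).dropLast)) := by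
  induction l with
  | nil =>
    intro seen cur
    have h1 : ∀ t : List Char, t.reverse = cur.reverse ↔ t = cur := by
      intro t; exact List.reverse_inj
    simp [dGo, mySegs, List.modifyHead, h1, ← List.length_eq_zero_iff]
  | cons c rest ih =>
    intro seen cur
    by_cases hc : c = ' ' ∨ c = ','
    · have hceq : (c == ' ' || c == ',') = true := by
        rcases hc with h | h <;> simp [h]
      obtain ⟨s, ss, hss⟩ : ∃ s ss, mySegs rest = s :: ss := by
        cases h : mySegs rest with
        | nil => exact absurd h (mySegs_ne_nil rest)
        | cons s ss => exact ⟨s, ss, rfl⟩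
      have hsegs : (mySegs (c :: rest)).modifyHead (cur.reverse ++ ·) = cur.reverse :: mySegs rest := by
        simp [mySegs, hc, List.modifyHead]
      rw [dGo]
      rw [hceq, if_pos rfl, ih (cur :: seen) []]
      rw [hsegs]
      have hm : (mySegs rest).modifyHead (List.reverse [] ++ ·) = mySegs rest := by
        simp [modifyHead_id']
      rw [hm]
      have hlast : (cur.reverse :: mySegs rest).getLastD [] = (mySegs rest).getLastD [] := by
        rw [hss]; simp [List.getLastD]
      have hdrop : (cur.reverse :: mySegs rest).dropLast = cur.reverse :: (mySegs rest).dropLast := by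
        rw [hss]; simp
      rw [hlast, hdrop]
      constructor
      · rintro ⟨hne, h1 | h2 | h3⟩
        · exact ⟨hne, Or.inl h1⟩
        · obtain ⟨t, ht, hrev⟩ := h2
          rcases List.mem_cons.mp ht with he | hm'
          · subst he; exact ⟨hne, Or.inr (Or.inr (List.mem_cons.mpr (Or.inl hrev.symm)))⟩
          · exact ⟨hne, Or.inr (Or.inl ⟨t, hm', hrev⟩)⟩
        · exact ⟨hne, Or.inr (Or.inr (List.mem_cons.mpr (Or.inr h3)))⟩
      · rintro ⟨hne, h1 | h2 | h3⟩
        · exact ⟨hne, Or.inl h1⟩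
        · obtain ⟨t, ht, hrev⟩ := h2
          exact ⟨hne, Or.inr (Or.inl ⟨t, List.mem_cons_of_mem _ ht, hrev⟩)⟩
        · rcases List.mem_cons.mp h3 with he | hm'
          · exact ⟨hne, Or.inr (Or.inl ⟨cur, List.mem_cons_self, he.symm⟩)⟩
          · exact ⟨hne, Or.inr (Or.inr hm')⟩
    · have hceq : (c == ' ' || c == ',') = false := by
        have h1 : ¬ c = ' ' := fun h => hc (Or.inl h)
        have h2 : ¬ c = ',' := fun h => hc (Or.inr h)
        simp [h1, h2]
      have hsegs : (mySegs (c :: rest)).modifyHead (cur.reverse ++ ·)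
          = (mySegs rest).modifyHead ((c :: cur).reverse ++ ·) := by
        cases h : mySegs rest with
        | nil => exact absurd h (mySegs_ne_nil rest)
        | cons s ss => simp [mySegs, hc, h, List.modifyHead]
      rw [dGo]
      rw [hceq, if_neg (by simp), ih seen (c :: cur), hsegs]

theorem D_iff (s : String) : D_split_keywords_generator s ↔ Dseg s := by
  unfold D_split_keywords_generator Dseg
  rw [dGo_iff]
  simp [modifyHead_id']

-- invariant of A's index loop: from position (pre++cur).length on, with `last` at the
-- start of the current partial word `cur`, the loop yields exactly what goKW yields
theorem A_loop (rest : List Char) : ∀ (pre cur : List Char)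
    (seen : PySem.Set (List Char)) (out : List String), rest ≠ [] →
    ((PySem.List.pyRange ((pre ++ cur).length : Int) (((pre ++ cur ++ rest).length : Nat) : Int) 1).foldl
        (stepA (pre ++ cur ++ rest)) (((pre.length : Nat) : Int), seen, out)).2.2
      = goKW rest cur seen out := by
  induction rest with
  | nil => intro _ _ _ _ h; exact absurd rfl h
  | cons c rest' ih =>
    intro pre cur seen out _
    have hlen : (pre ++ cur ++ (c :: rest')).length
        = (pre ++ cur).length + 1 + rest'.length := by simp; omega
    have ha : ((pre ++ cur).length : Int) < ((pre ++ cur ++ (c :: rest')).length : Int) := by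
      rw [hlen]; push_cast; omega
    rw [PySem.List.pyRange_one_cons ha, List.foldl_cons]
    have hget : PySem.List.pyGetD (pre ++ cur ++ (c :: rest')) ((pre ++ cur).length : Int) ' ' = c := by
      have h0 : ((pre ++ cur) ++ (c :: rest'))[(pre ++ cur).length]? = some c := by
        rw [List.getElem?_append_right (le_refl _)]; simp
      rw [PySem.List.pyGetD_natCast, List.getD_eq_getElem?_getD, h0]; rfl
    have hdrop : (pre ++ cur ++ (c :: rest')).drop pre.length = cur ++ (c :: rest') := by
      rw [List.append_assoc, List.drop_left]
    by_cases hc : c = ' ' ∨ c = ','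
    · -- separator step
      have hsep : PySem.Set.contains (PySem.Set.ofList [' ', ','])
          (PySem.List.pyGetD (pre ++ cur ++ (c :: rest')) ((pre ++ cur).length : Int) ' ') = true := by
        rw [hget]; exact (sep_contains c).mpr hc
      have hword : PySem.List.slice (pre ++ cur ++ (c :: rest'))
          (some ((pre.length : Nat) : Int)) (some ((pre ++ cur).length : Int)) = cur := by
        rw [PySem.List.slice_natCast, hdrop]
        simp
      have hmin : min (((pre ++ cur).length : Int) + 1) (PySem.List.len (pre ++ cur ++ (c :: rest')))
          = ((pre ++ cur).length : Int) + 1 := by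
        simp only [PySem.List.len_eq, hlen]; push_cast; omega
      have hiflen : ((((pre ++ cur).length : Nat) : Int) - ((pre.length : Nat) : Int) > 1)
          ↔ 1 < cur.length := by simp only [List.length_append]; push_cast; omega
      -- reduce the single step
      rw [show stepA (pre ++ cur ++ (c :: rest'))
            (((pre.length : Nat) : Int), seen, out) ((pre ++ cur).length : Int)
          = ((((pre ++ cur).length : Int) + 1),
              (if 1 < cur.length ∧ ¬ PySem.Set.contains seen cur = true then
                (PySem.Set.add seen cur, out ++ [String.ofList cur]) else (seen, out)).1,
              (if 1 < cur.length ∧ ¬ PySem.Set.contains seen cur = true then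
                (PySem.Set.add seen cur, out ++ [String.ofList cur]) else (seen, out)).2) from by
        rw [stepA]
        rw [if_pos hsep]
        simp only [hword, hmin]
        by_cases h1 : 1 < cur.length
        · rw [if_pos (hiflen.mpr h1)]
          by_cases h2 : PySem.Set.contains seen cur = true
          · rw [if_pos h2]
            rw [if_neg (fun h : 1 < cur.length ∧ ¬ PySem.Set.contains seen cur = true => h.2 h2)]
          · rw [if_neg h2]
            rw [if_pos (⟨h1, h2⟩ : 1 < cur.length ∧ ¬ PySem.Set.contains seen cur = true)]
        · rw [if_neg (fun h => h1 (hiflen.mp h))]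
          rw [if_neg (fun h : 1 < cur.length ∧ ¬ PySem.Set.contains seen cur = true => h1 h.1)]]
      -- now continue: either rest' is empty (range exhausted) or apply the IH
      rcases eq_or_ne rest' [] with hre | hre
      · subst hre
        have hend : ((pre ++ cur ++ [c]).length : Int) = ((pre ++ cur).length : Int) + 1 := by
          simp; omega
        rw [show PySem.List.pyRange (((pre ++ cur).length : Int) + 1)
              (((pre ++ cur ++ [c]).length : Nat) : Int) 1 = [] from by
          rw [hend]; simp [PySem.List.pyRange]]
        simp only [List.foldl_nil]
        rw [goKW]
        rw [if_pos hc]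
        by_cases hcond : 1 < cur.length ∧ ¬ PySem.Set.contains seen cur = true
        · rw [if_pos hcond, if_pos hcond, goKW]; simp
        · rw [if_neg hcond, if_neg hcond, goKW]; simp
      · have hcs : pre ++ cur ++ (c :: rest') = (pre ++ cur ++ [c]) ++ [] ++ rest' := by simp
        have h1 : ((pre ++ cur).length : Int) + 1 = (((pre ++ cur ++ [c]) ++ []).length : Int) := by
          simp; omega
        have h2 : ((pre ++ cur).length : Int) + 1 = (((pre ++ cur ++ [c]).length : Nat) : Int) := by
          simp; omega
        rw [goKW, if_pos hc]
        by_cases hcond : 1 < cur.length ∧ ¬ PySem.Set.contains seen cur = true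
        · rw [if_pos hcond, if_pos hcond]
          have := ih (pre ++ cur ++ [c]) [] (PySem.Set.add seen cur)
            (out ++ [String.ofList cur]) hre
          rw [hcs, h1]
          simpa using this
        · rw [if_neg hcond, if_neg hcond]
          have := ih (pre ++ cur ++ [c]) [] seen out hre
          rw [hcs, h1]
          simpa using this
    · -- ordinary character
      have hsep : ¬ PySem.Set.contains (PySem.Set.ofList [' ', ','])
          (PySem.List.pyGetD (pre ++ cur ++ (c :: rest')) ((pre ++ cur).length : Int) ' ') = true := by
        rw [hget]; exact fun h => hc ((sep_contains c).mp h)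
      rcases eq_or_ne rest' [] with hre | hre
      · subst hre
        have hendI : ((pre ++ cur).length : Int) + 1
            = PySem.List.len (pre ++ cur ++ [c]) := by simp; omega
        have hslice : PySem.List.slice (pre ++ cur ++ [c])
            (some ((pre.length : Nat) : Int)) (some (PySem.List.len (pre ++ cur ++ [c]))) = cur ++ [c] := by
          simp only [PySem.List.len_eq]
          rw [PySem.List.slice_natCast, hdrop]
          simp
        rw [show stepA (pre ++ cur ++ [c]) (((pre.length : Nat) : Int), seen, out)
              ((pre ++ cur).length : Int)
            = (((pre.length : Nat) : Int), seen, out ++ [String.ofList (cur ++ [c])]) from by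
          rw [stepA, if_neg hsep, if_pos hendI, hslice]]
        rw [show PySem.List.pyRange (((pre ++ cur).length : Int) + 1)
              (((pre ++ cur ++ [c]).length : Nat) : Int) 1 = [] from by
          have : (((pre ++ cur ++ [c]).length : Nat) : Int) = ((pre ++ cur).length : Int) + 1 := by
            simp; omega
          rw [this]; simp [PySem.List.pyRange]]
        simp only [List.foldl_nil]
        rw [goKW, if_neg hc, goKW]
        simp
      · have hne : ¬ (((pre ++ cur).length : Int) + 1
            = PySem.List.len (pre ++ cur ++ (c :: rest'))) := by
          simp only [PySem.List.len_eq, hlen]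
          push_cast
          intro h
          have : rest'.length = 0 := by omega
          exact hre (List.eq_nil_of_length_eq_zero this)
        rw [show stepA (pre ++ cur ++ (c :: rest')) (((pre.length : Nat) : Int), seen, out)
              ((pre ++ cur).length : Int)
            = (((pre.length : Nat) : Int), seen, out) from by
          rw [stepA, if_neg hsep, if_neg hne]]
        rw [goKW, if_neg hc]
        have hcs : pre ++ cur ++ (c :: rest') = pre ++ (cur ++ [c]) ++ rest' := by simp
        have h1 : ((pre ++ cur).length : Int) + 1 = ((pre ++ (cur ++ [c])).length : Int) := by
          simp; omega
        have := ih pre (cur ++ [c]) seen out hre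
        rw [hcs, h1]
        simpa using this

-- goKW produces the segment-based fold, with A's unfiltered trailing yield
theorem goKW_eq_segs (cs : List Char) : ∀ (cur : List Char)
    (seen : PySem.Set (List Char)) (out : List String),
    goKW cs cur seen out =
      (if ((mySegs cs).modifyHead (cur ++ ·)).getLastD [] ≠ [] then
        ((((mySegs cs).modifyHead (cur ++ ·)).dropLast.foldl bstep (seen, out)).2
          ++ [String.ofList (((mySegs cs).modifyHead (cur ++ ·)).getLastD [])])
      else (((mySegs cs).modifyHead (cur ++ ·)).dropLast.foldl bstep (seen, out)).2) := by
  induction cs with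
  | nil =>
    intro cur seen out
    by_cases h : cur = [] <;> simp [goKW, mySegs, List.modifyHead, h]
  | cons c rest ih =>
    intro cur seen out
    by_cases hc : c = ' ' ∨ c = ','
    · -- separator: first segment of (c :: rest) is closed off as `cur`
      obtain ⟨s, ss, hss⟩ : ∃ s ss, mySegs rest = s :: ss := by
        cases h : mySegs rest with
        | nil => exact absurd h (mySegs_ne_nil rest)
        | cons s ss => exact ⟨s, ss, rfl⟩
      have hsegs : (mySegs (c :: rest)).modifyHead (cur ++ ·) = cur :: mySegs rest := by
        simp [mySegs, hc, List.modifyHead]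
      rw [goKW]
      simp only [hc, if_true]
      have hdrop : (cur :: mySegs rest).dropLast = cur :: (mySegs rest).dropLast := by
        rw [hss]; simp
      have hlast : (cur :: mySegs rest).getLastD [] = (mySegs rest).getLastD [] := by
        rw [hss]; simp [List.getLastD]
      have hfold : ∀ st, (cur :: (mySegs rest).dropLast).foldl bstep st
          = (mySegs rest).dropLast.foldl bstep (bstep st cur) := by intro st; simp
      by_cases hcond : 1 < cur.length ∧ ¬ PySem.Set.contains seen cur = true
      · simp only [hcond]
        rw [ih [] (PySem.Set.add seen cur) (out ++ [String.ofList cur])]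
        have hmem : cur ∉ seen := by simpa using hcond.2
        simp only [hsegs, hdrop, hlast, hfold]
        simp [bstep, hcond.1, hmem, modifyHead_id']
      · simp only [hcond, if_false]
        rw [ih [] seen out]
        simp only [hsegs, hdrop, hlast, hfold]
        have : bstep (seen, out) cur = (seen, out) := by rw [bstep, if_neg hcond]
        simp [this, modifyHead_id']
    · -- ordinary character: it is appended to the current segment
      have hsegs : (mySegs (c :: rest)).modifyHead (cur ++ ·)
          = (mySegs rest).modifyHead ((cur ++ [c]) ++ ·) := by
        cases h : mySegs rest with
        | nil => exact absurd h (mySegs_ne_nil rest)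
        | cons s ss => simp [mySegs, hc, h, List.modifyHead]
      rw [goKW]
      simp only [hc, if_false]
      rw [ih (cur ++ [c]) seen out, hsegs]

theorem A_eq_goKW (cs : List Char) :
    ((PySem.List.pyRange 0 (PySem.List.len cs) 1).foldl (stepA cs)
        (0, PySem.Set.empty, [])).2.2 = goKW cs [] PySem.Set.empty [] := by
  cases cs with
  | nil => rfl
  | cons c t =>
    have := A_loop (c :: t) [] [] PySem.Set.empty [] (by simp)
    simpa [PySem.List.len_eq] using this

theorem A_port_eq (s : String) :
    split_keywords_generator s
      = (if (mySegs s.toList).getLastD [] ≠ [] then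
          (((mySegs s.toList).dropLast.foldl bstep (PySem.Set.empty, [])).2
            ++ [String.ofList ((mySegs s.toList).getLastD [])])
        else ((mySegs s.toList).dropLast.foldl bstep (PySem.Set.empty, [])).2) := by
  have h1 : split_keywords_generator s = goKW s.toList [] PySem.Set.empty [] :=
    A_eq_goKW s.toList
  rw [h1, goKW_eq_segs]
  simp only [List.nil_append, modifyHead_id']

theorem B_port_eq (s : String) :
    split_keywords_generator_alt s = ((mySegs s.toList).foldl bstep (PySem.Set.empty, [])).2 := by
  unfold split_keywords_generator_alt
  rw [replace_eq_map, splitOn_eq_mySegs]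
  rfl

-- membership in the seen-set after a bstep fold
theorem contains_bstep_mono (st : PySem.Set (List Char) × List String) (a x : List Char)
    (h : PySem.Set.contains st.1 x = true) : PySem.Set.contains (bstep st a).1 x = true := by
  rw [bstep]
  split
  · simp only []
    simp only [PySem.Set.contains, PySem.Set.add] at *
    split <;> simp_all
  · exact h

theorem contains_foldl_mono (l : List (List Char)) : ∀ (st : PySem.Set (List Char) × List String)
    (x : List Char), PySem.Set.contains st.1 x = true →
    PySem.Set.contains (l.foldl bstep st).1 x = true := by
  induction l with
  | nil => intro st x h; exact h
  | cons a t ih => intro st x h; exact ih _ x (contains_bstep_mono st a x h)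

theorem contains_foldl_of_not_mem (l : List (List Char)) : ∀ (st : PySem.Set (List Char) × List String)
    (x : List Char), x ∉ l → PySem.Set.contains st.1 x = false →
    PySem.Set.contains (l.foldl bstep st).1 x = false := by
  induction l with
  | nil => intro st x _ h; exact h
  | cons a t ih =>
    intro st x hx h
    have hxa : x ≠ a := fun he => hx (he ▸ List.mem_cons_self)
    have hxt : x ∉ t := fun he => hx (List.mem_cons_of_mem _ he)
    refine ih _ x hxt ?_
    rw [bstep]
    split
    · simp only [PySem.Set.add]
      split
      · exact h
      · simp only [PySem.Set.contains] at *
        simp_all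
    · exact h

theorem contains_foldl_of_mem (l : List (List Char)) : ∀ (st : PySem.Set (List Char) × List String)
    (x : List Char), x ∈ l → 1 < x.length →
    PySem.Set.contains (l.foldl bstep st).1 x = true := by
  induction l with
  | nil => intro _ _ h; simp at h
  | cons a t ih =>
    intro st x hx hlen
    rcases List.mem_cons.mp hx with he | ht
    · subst he
      refine contains_foldl_mono t _ x ?_
      rw [bstep]
      by_cases hc : PySem.Set.contains st.1 x = true
      · split <;> [exact contains_bstep_mono st x x hc ▸ (by
          rw [bstep] at *; simp_all); exact hc]
      · rw [if_pos ⟨hlen, hc⟩]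
        simp only [PySem.Set.add, hc]
        simp only [PySem.Set.contains] at *
        simp_all
    · exact ih _ x ht hlen

-- A vs B at the trailing token: the only place they can differ
theorem AB_compare (s : String) :
    (split_keywords_generator s,
     split_keywords_generator_alt s)
    = (let segs := mySegs s.toList
       let F := segs.dropLast.foldl bstep (PySem.Set.empty, [])
       let last := segs.getLastD []
       ((if last ≠ [] then F.2 ++ [String.ofList last] else F.2),
        (bstep F last).2)) := by
  have hne := mySegs_ne_nil s.toList
  have hsplit : (mySegs s.toList).dropLast ++ [(mySegs s.toList).getLastD []] = mySegs s.toList := by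
    rw [List.getLastD_eq_getLast?, List.getLast?_eq_some_getLast hne]
    exact List.dropLast_concat_getLast hne
  rw [A_port_eq, B_port_eq]
  simp only []
  congr 1
  conv_lhs => rw [← hsplit]
  rw [List.foldl_append]
  simp

-- ===== VERDICT (by name: the statement is the Claim_ definition above) =====
theorem split_keywords_generator_spec : Claim_unchanged_split_keywords_generator := by
  intro s _
  unfold Spec_split_keywords_generator
  intro hD
  rw [D_iff] at hD
  unfold Dseg at hD
  push Not at hD
  have h := AB_compare s
  simp only [] at h
  have hA := congrArg Prod.fst h
  have hB := congrArg Prod.snd h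
  simp only [] at hA hB
  rw [hA, hB]
  by_cases hlast : (mySegs s.toList).getLastD [] = []
  · rw [if_neg (by simpa using hlast), bstep]
    rw [if_neg (by rintro ⟨h1, _⟩; rw [hlast] at h1; simp at h1)]
  · obtain ⟨hlen1, hmem⟩ := hD hlast
    have hpos : 0 < ((mySegs s.toList).getLastD []).length :=
      List.length_pos_of_ne_nil hlast
    have hlen : 1 < ((mySegs s.toList).getLastD []).length := by omega
    have hnc : PySem.Set.contains
        ((mySegs s.toList).dropLast.foldl bstep (PySem.Set.empty, [])).1
        ((mySegs s.toList).getLastD []) = false :=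
      contains_foldl_of_not_mem _ _ _ hmem rfl
    rw [if_pos hlast, bstep, if_pos ⟨hlen, by rw [hnc]; simp⟩]

theorem split_keywords_generator_changed : Claim_changed_split_keywords_generator := by
  unfold Claim_changed_split_keywords_generator
  refine ⟨by decide, by decide, by decide, by decide, by decide⟩

theorem split_keywords_generator_tight : Claim_exact_split_keywords_generator := by
  intro s _ hD
  rw [D_iff] at hD
  unfold Dseg at hD
  obtain ⟨hlast, hD2⟩ := hD
  have h := AB_compare s
  simp only [] at h
  have hA := congrArg Prod.fst h
  have hB := congrArg Prod.snd h
  simp only [] at hA hB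
  rw [hA, hB, if_pos hlast]
  have hskip : bstep ((mySegs s.toList).dropLast.foldl bstep (PySem.Set.empty, []))
      ((mySegs s.toList).getLastD [])
      = (mySegs s.toList).dropLast.foldl bstep (PySem.Set.empty, []) := by
    rw [bstep]
    rcases hD2 with h1 | h2
    · rw [if_neg (by rintro ⟨hl, _⟩; omega)]
    · by_cases hl1 : 1 < ((mySegs s.toList).getLastD []).length
      · have hc := contains_foldl_of_mem (mySegs s.toList).dropLast (PySem.Set.empty, []) _ h2 hl1
        rw [if_neg (by rintro ⟨_, hn⟩; exact hn hc)]
      · rw [if_neg (by rintro ⟨hl, _⟩; exact hl1 hl)]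
  rw [hskip]
  intro heq
  have := congrArg List.length heq
  simp at this
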